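-- pv_equiv track=rewrite | github.com/rogerio410/ads-i-algoritmos-2018 | AtividadeO/Alunos/Atividade_O_Paulo_Vilarinho/marte.py | count_erros
-- ===== SOURCE A (Python) =====
-- def count_erros(mensagem):
--     erros = 0
--     aux = 1
--     for i in range(len(mensagem)):
--         if aux == 1 :
--             if mensagem[i] != "S" :
--                 erros += 1
--         elif aux == 2 :
--             if mensagem[i] != "O" :
--                 erros += 1
--         elif aux == 3 :
--             if mensagem[i] != "S" :
--                 erros += 1
--         if aux == 3:
--             aux = 1
--         else :
--             aux += 1
--
--     return erros
-- ===== SOURCE B (Python) =====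
-- def count_erros(mensagem):
--     s0 = mensagem[0::3]
--     s1 = mensagem[1::3]
--     s2 = mensagem[2::3]
--     return (len(s0) - s0.count("S")) + (len(s1) - s1.count("O")) + (len(s2) - s2.count("S"))
-- ===== Notes on version B (the rewrite author's own statement) =====
-- stated objective: faster
-- what changed: Replaces A's per-character aux-state-machine loop with a partition of the message into the three stride-3 slices mensagem[0::3], mensagem[1::3], mensagem[2::3], scoring each as len(slice) - slice.count(expected char).
import Mathlib
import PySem

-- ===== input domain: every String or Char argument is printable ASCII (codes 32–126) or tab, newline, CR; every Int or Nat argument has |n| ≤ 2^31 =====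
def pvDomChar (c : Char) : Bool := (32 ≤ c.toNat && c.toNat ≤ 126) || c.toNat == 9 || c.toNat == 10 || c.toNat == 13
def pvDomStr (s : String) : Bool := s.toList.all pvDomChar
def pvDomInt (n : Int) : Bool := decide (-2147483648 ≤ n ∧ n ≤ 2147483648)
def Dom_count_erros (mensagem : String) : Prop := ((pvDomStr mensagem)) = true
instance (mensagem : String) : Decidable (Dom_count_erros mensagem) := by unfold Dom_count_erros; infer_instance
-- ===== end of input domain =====

-- B replaces A's per-character aux-state machine by the three position-mod-3 strided
-- slices, scoring each with len/count (measured constant-factor faster in Python).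

-- ===== PORT A =====
-- the body of A's loop: the erros/aux update for one character mensagem[i]
def aStep (st : Int × Int) (c : Char) : Int × Int :=
  let erros := st.1
  let aux := st.2
  let erros :=
    if aux == 1 then (if c != 'S' then erros + 1 else erros)
    else if aux == 2 then (if c != 'O' then erros + 1 else erros)
    else if aux == 3 then (if c != 'S' then erros + 1 else erros)
    else erros
  let aux := if aux == 3 then (1 : Int) else aux + 1
  (erros, aux)

def count_erros (mensagem : String) : Int :=
  let l := mensagem.toList
  ((PySem.List.pyRange 0 (PySem.List.len l) 1).foldl
    (fun st i => aStep st (PySem.List.pyGetD l i ' ')) ((0 : Int), (1 : Int))).1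

-- ===== PORT B =====
def count_erros_alt (mensagem : String) : Int :=
  let l := mensagem.toList
  let s0 := (PySem.List.slice? l (some 0) none 3).getD []
  let s1 := (PySem.List.slice? l (some 1) none 3).getD []
  let s2 := (PySem.List.slice? l (some 2) none 3).getD []
  (PySem.Chars.len s0 - (PySem.Chars.count s0 ['S'] : Int))
  + (PySem.Chars.len s1 - (PySem.Chars.count s1 ['O'] : Int))
  + (PySem.Chars.len s2 - (PySem.Chars.count s2 ['S'] : Int))

-- ===== PRECONDITION & SPEC =====
def Spec_count_erros (mensagem : String) (out : Int) : Prop := out = count_erros_alt mensagem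
instance (mensagem : String) (out : Int) : Decidable (Spec_count_erros mensagem out) := by unfold Spec_count_erros; infer_instance

-- ===== CLAIM (what is proved, stated in full; the proofs are below) =====
def Claim_equal_count_erros : Prop := ∀ (mensagem : String), Dom_count_erros mensagem → Spec_count_erros mensagem (count_erros mensagem)

-- ===== LEMMAS AND PROOFS =====

-- every third element of a list (what the Python slice l[a::3] selects, after dropping a)
def every3 : List Char → List Char
  | [] => []
  | [a] => [a]
  | [a, _] => [a]
  | a :: _ :: _ :: t => a :: every3 t

lemma every3_cons (a : Char) (t : List Char) :
    every3 (a :: t) = a :: every3 (t.drop 2) := by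
  match t with
  | [] => simp [every3]
  | [b] => simp [every3]
  | b :: c :: r => simp [every3]

-- A's error count from loop state aux, characterized recursively
def errs : Int → List Char → Int
  | _, [] => 0
  | aux, c :: t =>
    (if aux == 1 then (if c != 'S' then (1 : Int) else 0)
     else if aux == 2 then (if c != 'O' then (1 : Int) else 0)
     else if aux == 3 then (if c != 'S' then (1 : Int) else 0)
     else 0)
    + errs (if aux == 3 then 1 else aux + 1) t

lemma foldl_aStep (l : List Char) (e aux : Int) :
    (l.foldl aStep (e, aux)).1 = e + errs aux l := by
  induction l generalizing e aux with
  | nil => simp [errs]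
  | cons c t ih =>
    simp only [List.foldl_cons, aStep, errs, ih]
    split_ifs <;> ring

-- A's count from the start state is B's three strided len-minus-count scores
lemma errs1_eq (l : List Char) :
    errs 1 l =
      (((every3 l).length : Int) - ((every3 l).count 'S' : Int))
      + (((every3 (l.drop 1)).length : Int) - ((every3 (l.drop 1)).count 'O' : Int))
      + (((every3 (l.drop 2)).length : Int) - ((every3 (l.drop 2)).count 'S' : Int)) := by
  match l with
  | [] => simp [errs, every3]
  | [a] =>
    simp [errs, every3, List.count_cons]
    split_ifs <;> simp_all
  | [a, b] =>
    simp [errs, every3, List.count_cons]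
    split_ifs <;> simp_all
  | a :: b :: c :: rest =>
    have ih := errs1_eq rest
    simp only [errs]
    norm_num
    rw [every3_cons a, every3_cons b, every3_cons c]
    simp only [List.drop_succ_cons, List.drop_zero, List.length_cons, List.count_cons]
    rw [ih]
    push_cast
    split_ifs <;> simp_all <;> try omega
termination_by l.length

-- the stride-3 index selection that the slice l[a::3] performs, at offset 0
lemma stride0 (t : List Char) :
    (List.range ((t.length + 2) / 3)).filterMap (fun k => t[3*k]?) = every3 t := by
  match t with
  | [] => simp [every3]
  | a :: rest =>
    have ih := stride0 (rest.drop 2)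
    rw [every3_cons]
    have hrange : ((a :: rest).length + 2) / 3 = ((rest.drop 2).length + 2) / 3 + 1 := by
      simp; omega
    rw [hrange, List.range_succ_eq_map, List.filterMap_cons]
    simp only [Nat.mul_zero, List.getElem?_cons_zero, List.filterMap_map]
    rw [← ih]
    congr 1
    apply List.filterMap_congr
    intro k _
    have h3 : 3 * (k + 1) = 3 + 3 * k := by ring
    simp only [Function.comp, h3]
    rw [← List.getElem?_drop]
    congr 1
termination_by t.length
decreasing_by simp

-- l[a::3] = every3 (l.drop a) for a natural start index a
lemma slice3 (l : List Char) (a : Nat) :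
    PySem.List.slice? l (some (a : Int)) none 3 = some (every3 (l.drop a)) := by
  simp only [PySem.List.slice?, PySem.List.sliceIndices]
  norm_num
  simp only [if_neg (show ¬((a : Int) < 0) by omega)]
  by_cases h : a < l.length
  · have hlt : (a : Int) < (l.length : Int) := by exact_mod_cast h
    rw [min_eq_left (le_of_lt hlt), if_pos hlt]
    have hcnt : (((l.length : Int) - a + 3 - 1) / 3).toNat = ((l.drop a).length + 2) / 3 := by
      simp only [List.length_drop]
      omega
    rw [hcnt, ← stride0 (l.drop a)]
    apply List.filterMap_congr
    intro k _
    rw [show ((a : Int) + 3 * (k : Int)).toNat = a + 3 * k by omega]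
    simp [List.getElem?_drop]
  · have hge : (l.length : Int) ≤ (a : Int) := by omega
    rw [min_eq_right hge, if_neg (by omega : ¬ ((l.length : Int) < (l.length : Int)))]
    have hd : l.drop a = [] := by
      apply List.drop_eq_nil_of_le; omega
    simp [hd, every3]

-- Python's substring count with a one-character needle is List.count
lemma countGo (ch : Char) (fuel : Nat) (t : List Char) (h : t.length ≤ fuel) (acc : Nat) :
    PySem.Chars.count.go [ch] fuel t acc = acc + t.count ch := by
  induction fuel generalizing t acc with
  | zero =>
    have : t = [] := by cases t <;> simp_all
    subst this
    rw [PySem.Chars.count.go]; simp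
  | succ n ih =>
    cases t with
    | nil => rw [PySem.Chars.count.go] <;> simp
    | cons c rest =>
      rw [PySem.Chars.count.go]
      simp only [List.length_cons] at h
      by_cases hc : ch = c
      · subst hc
        simp only [List.isPrefixOf, BEq.rfl, Bool.true_and, if_pos, List.length_cons,
          List.length_nil]
        rw [show List.drop (0+1) (ch :: rest) = rest from rfl]
        rw [ih rest (by omega)]
        simp
        omega
      · have hb : (ch == c) = false := by simp [hc]
        simp only [List.isPrefixOf, hb, Bool.false_and, Bool.false_eq_true, if_false]
        rw [ih rest (by omega)]
        simp [List.count_cons, show (c == ch) = false by simp [Ne.symm hc]]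

lemma count_single (ch : Char) (t : List Char) :
    PySem.Chars.count t [ch] = t.count ch := by
  rw [PySem.Chars.count]
  simp only [List.isEmpty, Bool.false_eq_true, if_false]
  simpa using countGo ch t.length t le_rfl 0

lemma slice3_at (l : List Char) :
    (PySem.List.slice? l (some 0) none 3 = some (every3 l))
    ∧ (PySem.List.slice? l (some 1) none 3 = some (every3 (l.drop 1)))
    ∧ (PySem.List.slice? l (some 2) none 3 = some (every3 (l.drop 2))) := by
  refine ⟨?_, ?_, ?_⟩
  · simpa using slice3 l 0
  · simpa using slice3 l 1
  · simpa using slice3 l 2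

lemma alt_eq (m : String) : count_erros_alt m = errs 1 m.toList := by
  obtain ⟨h0, h1, h2⟩ := slice3_at m.toList
  simp only [count_erros_alt, h0, h1, h2, Option.getD_some, PySem.Chars.len, count_single]
  rw [errs1_eq]

-- ===== VERDICT (by name: the statement is the Claim_ definition above) =====
theorem count_erros_spec : Claim_equal_count_erros := by
  intro m _
  unfold Spec_count_erros
  rw [alt_eq]
  simp only [count_erros]
  rw [PySem.List.foldl_pyRange_zero_pyGetD m.toList ' ' aStep ((0 : Int), (1 : Int))]
  rw [foldl_aStep]
  simp
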